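-- pv_equiv track=rewrite | github.com/LeeHuangChenCS/Module-Decomposition-Algorithm | src/defineBordersFromGraph.py | renameModules
-- ===== SOURCE A (Python) =====
-- def renameModules(moduleFamilyInfo):
--     moduleCounter = 1
--     moduleDict = {}
--     for protein in moduleFamilyInfo.keys():
--         modules = moduleFamilyInfo[protein]
--         for module in modules:
--             moduleName = module[0]
--             if moduleName in moduleDict.keys():
--                 module[0] = moduleDict[moduleName]
--             else:
--                 module[0] = moduleCounter
--                 moduleDict[moduleName] = moduleCounter
--                 moduleCounter += 1
--
--     return moduleCounter - 1
-- ===== SOURCE B (Python) =====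
-- def renameModules(moduleFamilyInfo):
--     # Flatten: every module name in iteration order; dedupe keeping first occurrences.
--     names = [module[0] for modules in moduleFamilyInfo.values() for module in modules]
--     order = list(dict.fromkeys(names))
--     moduleDict = {name: i + 1 for i, name in enumerate(order)}
--     # Renumber every module in place.
--     for modules in moduleFamilyInfo.values():
--         for module in modules:
--             module[0] = moduleDict[module[0]]
--     return len(order)
-- ===== Notes on version B (the rewrite author's own statement) =====
-- stated objective: simpler
-- what changed: B replaces A's interleaved counter-plus-dict loop by flatten/dedup/count: it flattens all module names into one list, dedupes it with dict.fromkeys (first occurrences), derives the numbering dict from enumerate of that deduped list, renumbers in a separate pass, and returns len(order) instead of maintaining a running counter.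
import Mathlib
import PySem

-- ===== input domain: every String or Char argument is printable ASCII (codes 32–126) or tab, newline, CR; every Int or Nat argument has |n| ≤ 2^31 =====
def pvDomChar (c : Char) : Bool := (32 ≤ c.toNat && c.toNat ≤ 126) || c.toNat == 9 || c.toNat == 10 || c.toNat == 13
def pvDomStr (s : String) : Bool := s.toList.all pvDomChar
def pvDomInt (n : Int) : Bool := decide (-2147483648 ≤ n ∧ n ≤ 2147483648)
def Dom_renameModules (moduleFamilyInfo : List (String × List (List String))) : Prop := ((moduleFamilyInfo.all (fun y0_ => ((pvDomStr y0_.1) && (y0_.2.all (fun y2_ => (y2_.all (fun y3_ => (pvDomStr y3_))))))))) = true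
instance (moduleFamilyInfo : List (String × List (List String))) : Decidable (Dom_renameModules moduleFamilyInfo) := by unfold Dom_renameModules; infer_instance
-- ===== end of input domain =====

-- B flattens all module names, dedupes (dict.fromkeys) and counts, instead of A's interleaved
-- counter/dict loop; equivalence is about the RETURN value only (both Pythons renumber the
-- module lists in place identically; that mutation is untypable here).

-- ===== PORT A =====
-- inner 'for module in modules' loop, state = (moduleCounter, moduleDict)
def renameModulesInner (st : Int × PySem.Dict String Int) (modules : List (List String)) : Int × PySem.Dict String Int :=
  modules.foldl (fun st module =>
    let moduleName := (PySem.List.pyGet? module (0 : Int)).getD ""   -- module[0]; none (IndexError) excluded by Pre_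
    if st.2.contains moduleName then st                              -- module[0] = moduleDict[moduleName] : mutation only
    else (st.1 + 1, st.2.insert moduleName st.1)) st                 -- module[0] = moduleCounter; dict insert; counter += 1

def renameModules (moduleFamilyInfo : List (String × List (List String))) : Int :=
  let st := moduleFamilyInfo.foldl (fun st p => renameModulesInner st p.2) (1, PySem.Dict.empty)
  st.1 - 1

-- ===== PORT B =====
-- names = [module[0] for modules in … for module in modules]; order = list(dict.fromkeys(names));
-- the numbering dict and the in-place renumbering pass affect only the mutated lists, not the
-- return value len(order), so they have no counterpart here
def renameModules_alt (moduleFamilyInfo : List (String × List (List String))) : Int :=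
  let names := moduleFamilyInfo.flatMap (fun p => p.2.map (fun module => (PySem.List.pyGet? module (0 : Int)).getD ""))
  let order := PySem.List.dedup names
  (order.length : Int)

-- ===== PRECONDITION & SPEC =====
-- Pre_ excludes (a) an empty module list inside some value, on which both Pythons raise IndexError at
-- module[0], and (b) duplicate protein keys, which a Python dict argument cannot represent (the assoc
-- list would iterate a key twice where the dict merges them).
def Pre_renameModules (moduleFamilyInfo : List (String × List (List String))) : Prop :=
  (moduleFamilyInfo.map Prod.fst).Nodup ∧ ∀ p ∈ moduleFamilyInfo, ∀ m ∈ p.2, m ≠ []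
instance (moduleFamilyInfo : List (String × List (List String))) : Decidable (Pre_renameModules moduleFamilyInfo) := by unfold Pre_renameModules; infer_instance
def pvWitness_renameModules : (List (String × List (List String))) :=
  [("p", [["a"], ["b"], ["a"]]), ("q", [["b"], ["c"]])]

def Spec_renameModules (moduleFamilyInfo : List (String × List (List String))) (out : Int) : Prop := out = renameModules_alt moduleFamilyInfo
instance (moduleFamilyInfo : List (String × List (List String))) (out : Int) : Decidable (Spec_renameModules moduleFamilyInfo out) := by unfold Spec_renameModules; infer_instance

-- ===== CLAIM (what is proved, stated in full; the proofs are below) =====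
def Claim_equal_renameModules : Prop := ∀ (moduleFamilyInfo : List (String × List (List String))), Dom_renameModules moduleFamilyInfo → Pre_renameModules moduleFamilyInfo → Spec_renameModules moduleFamilyInfo (renameModules moduleFamilyInfo)

-- ===== LEMMAS AND PROOFS =====

-- A's loop step, expressed on the module NAME (the step uses the module only through module[0])
def rmStep (st : Int × PySem.Dict String Int) (n : String) : Int × PySem.Dict String Int :=
  if st.2.contains n then st else (st.1 + 1, st.2.insert n st.1)

-- A's nested fold is the flat fold of rmStep over B's flattened name list
theorem rm_flatten (mfi : List (String × List (List String))) (st : Int × PySem.Dict String Int) :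
    mfi.foldl (fun st p => renameModulesInner st p.2) st =
      (mfi.flatMap (fun p => p.2.map (fun module => (PySem.List.pyGet? module (0 : Int)).getD ""))).foldl rmStep st := by
  induction mfi generalizing st with
  | nil => rfl
  | cons p rest ih =>
    simp only [List.flatMap_cons, List.foldl_append, List.foldl]
    rw [ih]
    congr 1
    simp [renameModulesInner, List.foldl_map, rmStep]

-- loop invariant: with counter = |s| + 1 and the dict's membership matching the set s,
-- the flat fold's counter tracks the length of Set-accumulation of the names into s
theorem rm_inv (ns : List String) : ∀ (s : List String) (d : PySem.Dict String Int),
    (∀ n, d.contains n = s.contains n) →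
    (ns.foldl rmStep (((s.length : Int)) + 1, d)).1 = ((ns.foldl PySem.Set.add s).length : Int) + 1 := by
  induction ns with
  | nil => intro s d _; rfl
  | cons n rest ih =>
    intro s d h
    by_cases hm : n ∈ s
    · have hst : rmStep (((s.length : Int)) + 1, d) n = (((s.length : Int)) + 1, d) := by
        simp [rmStep, h n, hm]
      have hset : PySem.Set.add s n = s := by
        simp [PySem.Set.add, hm]
      simp only [List.foldl, hst, hset]
      exact ih s d h
    · have hst : rmStep (((s.length : Int)) + 1, d) n
          = (((s.length : Int)) + 1 + 1, d.insert n (((s.length : Int)) + 1)) := by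
        simp [rmStep, h n, hm]
      have hset : PySem.Set.add s n = s ++ [n] := by
        simp [PySem.Set.add, hm]
      simp only [List.foldl, hst, hset]
      have h' : ∀ m, (d.insert n (((s.length : Int)) + 1)).contains m = (s ++ [n]).contains m := by
        intro m
        rw [PySem.Dict.contains_insert, h m]
        by_cases hmn : m = n <;> simp [hmn]
      have hrest := ih (s ++ [n]) (d.insert n (((s.length : Int)) + 1)) h'
      have hcast : ((((s ++ [n]).length : Nat) : Int)) + 1 = ((s.length : Int)) + 1 + 1 := by
        simp [List.length_append]
      rw [hcast] at hrest
      exact hrest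

-- ===== VERDICT (by name: the statement is the Claim_ definition above) =====
theorem renameModules_spec : Claim_equal_renameModules := by
  intro mfi _ _
  unfold Spec_renameModules renameModules renameModules_alt
  show (List.foldl (fun st p => renameModulesInner st p.2) (1, PySem.Dict.empty) mfi).1 - 1
      = ((PySem.List.dedup (mfi.flatMap (fun p => p.2.map (fun module => (PySem.List.pyGet? module (0 : Int)).getD "")))).length : Int)
  rw [rm_flatten]
  have h := rm_inv (mfi.flatMap (fun p => p.2.map (fun module => (PySem.List.pyGet? module (0 : Int)).getD ""))) [] PySem.Dict.empty (by simp)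
  simp only [List.length_nil, Nat.cast_zero, zero_add] at h
  rw [h]
  simp [PySem.List.dedup_eq_ofList, PySem.Set.ofList_eq_foldl]
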